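-- pv_equiv track=rewrite | github.com/hdamron17/ICPC-Solutions | 2019/carryless/carryless.py | even_digit_equiv
-- ===== SOURCE A (Python) =====
-- def even_digit_equiv(lhs_factor, rhs):
--     # Solves the equivalence for d: lhs_factor * d = rhs
--     # Assumes lhs_factor != 0 and lhs_factor is even
--     if rhs == 0:
--         return [0]
--
--     if rhs % 2 == 1:
--         return []
--
--     factor = lhs_factor
--     for i in range(1,5):
--         if factor == rhs:
--             return [i,i+5]
--         factor = factor + lhs_factor % 10
--     return []  # Should be unnecessary
-- ===== SOURCE B (Python) =====
-- def even_digit_equiv(lhs_factor, rhs):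
--     # Solves lhs_factor * d = rhs directly (closed form) instead of scanning.
--     if rhs == 0:
--         return [0]
--     if rhs % 2 == 1:
--         return []
--     step = lhs_factor % 10
--     if step == 0:
--         return [1, 6] if lhs_factor == rhs else []
--     diff = rhs - lhs_factor
--     if diff >= 0 and diff % step == 0:
--         i = diff // step + 1
--         if 1 <= i <= 4:
--             return [i, i + 5]
--     return []
-- ===== Notes on version B (the rewrite author's own statement) =====
-- stated objective: simpler
-- what changed: Replaces the 4-iteration scan over candidate multipliers with a direct closed-form solve of the linear equation (divisibility and range check on (rhs - lhs_factor) / (lhs_factor % 10), with the step == 0 case handled separately).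
import Mathlib
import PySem

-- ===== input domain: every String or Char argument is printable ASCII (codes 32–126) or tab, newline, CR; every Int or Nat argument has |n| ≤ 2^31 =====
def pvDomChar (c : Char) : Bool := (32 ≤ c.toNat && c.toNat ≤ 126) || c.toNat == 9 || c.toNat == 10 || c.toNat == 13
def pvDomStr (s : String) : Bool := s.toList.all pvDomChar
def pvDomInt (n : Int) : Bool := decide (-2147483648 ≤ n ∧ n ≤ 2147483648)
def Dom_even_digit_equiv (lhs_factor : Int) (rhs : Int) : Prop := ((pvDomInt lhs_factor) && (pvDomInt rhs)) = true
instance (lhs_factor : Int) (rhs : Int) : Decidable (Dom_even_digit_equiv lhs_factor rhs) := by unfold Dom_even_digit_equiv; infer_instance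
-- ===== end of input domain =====

-- B replaces A's 4-step scan by a direct closed-form solve of the linear equation; objective: simpler.

-- ===== PORT A =====
-- the 'for i in range(1,5)' loop: state = factor, early return on match
def evenDigitLoop (lhs_factor rhs : Int) : List Int → Int → List Int
  | [], _ => []
  | i :: rest, factor =>
    if factor = rhs then [i, i + 5]
    else evenDigitLoop lhs_factor rhs rest (factor + PySem.Int.mod lhs_factor 10)

def even_digit_equiv (lhs_factor : Int) (rhs : Int) : List Int :=
  if rhs = 0 then [0]
  else if PySem.Int.mod rhs 2 = 1 then []
  else evenDigitLoop lhs_factor rhs (PySem.List.pyRange 1 5 1) lhs_factor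

-- ===== PORT B =====
def even_digit_equiv_alt (lhs_factor : Int) (rhs : Int) : List Int :=
  if rhs = 0 then [0]
  else if PySem.Int.mod rhs 2 = 1 then []
  else
    let step := PySem.Int.mod lhs_factor 10
    if step = 0 then (if lhs_factor = rhs then [1, 6] else [])
    else
      let diff := rhs - lhs_factor
      if diff ≥ 0 ∧ PySem.Int.mod diff step = 0 then
        let i := PySem.Int.floordiv diff step + 1
        if 1 ≤ i ∧ i ≤ 4 then [i, i + 5] else []
      else []

-- ===== PRECONDITION & SPEC =====
def Spec_even_digit_equiv (lhs_factor : Int) (rhs : Int) (out : List Int) : Prop := out = even_digit_equiv_alt lhs_factor rhs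
instance (lhs_factor : Int) (rhs : Int) (out : List Int) : Decidable (Spec_even_digit_equiv lhs_factor rhs out) := by unfold Spec_even_digit_equiv; infer_instance

-- ===== CLAIM (what is proved, stated in full; the proofs are below) =====
def Claim_equal_even_digit_equiv : Prop := ∀ (lhs_factor : Int) (rhs : Int), Dom_even_digit_equiv lhs_factor rhs → Spec_even_digit_equiv lhs_factor rhs (even_digit_equiv lhs_factor rhs)

-- ===== LEMMAS AND PROOFS =====

theorem even_digit_equiv_core (lhs_factor rhs : Int) :
    even_digit_equiv lhs_factor rhs = even_digit_equiv_alt lhs_factor rhs := by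
  unfold even_digit_equiv even_digit_equiv_alt
  by_cases h0 : rhs = 0
  · rw [if_pos h0, if_pos h0]
  · rw [if_neg h0, if_neg h0]
    by_cases hodd : PySem.Int.mod rhs 2 = 1
    · rw [if_pos hodd, if_pos hodd]
    · rw [if_neg hodd, if_neg hodd]
      obtain ⟨s, hs, h0s, h10s⟩ : ∃ s, lhs_factor % 10 = s ∧ 0 ≤ s ∧ s < 10 :=
        ⟨lhs_factor % 10, rfl, Int.emod_nonneg _ (by omega), Int.emod_lt_of_pos _ (by omega)⟩
      have hm : PySem.Int.mod lhs_factor 10 = s := by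
        rw [PySem.Int.mod_eq_emod_of_pos (by omega : (0:Int) < 10), hs]
      have hrange : PySem.List.pyRange 1 5 1 = [1, 2, 3, 4] := by decide
      rw [hrange]
      simp only [evenDigitLoop, hm]
      by_cases hz : s = 0
      · subst hz
        by_cases he : lhs_factor = rhs <;>
          simp [he]
      · rw [if_neg hz]
        have hspos : 0 < s := lt_of_le_of_ne h0s (Ne.symm hz)
        have hmod2 : PySem.Int.mod (rhs - lhs_factor) s = (rhs - lhs_factor) % s :=
          PySem.Int.mod_eq_emod_of_pos hspos
        have hdiv : PySem.Int.floordiv (rhs - lhs_factor) s = (rhs - lhs_factor) / s :=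
          PySem.Int.floordiv_eq_ediv_of_pos hspos
        rw [hmod2, hdiv]
        -- interval_cases on s so omega can reason about / and % by a literal divisor
        interval_cases s <;>
          first
            | omega
            | (split_ifs <;>
                (try simp only [List.cons.injEq, and_true, List.nil_eq, List.cons_ne_nil,
                  reduceCtorEq]) <;> omega)

-- ===== VERDICT (by name: the statement is the Claim_ definition above) =====
theorem even_digit_equiv_spec : Claim_equal_even_digit_equiv := by
  intro l r _; unfold Spec_even_digit_equiv; exact even_digit_equiv_core l r
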